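-- pv_equiv track=rewrite | github.com/Joonsun-Hwang/coding-test-study-lamda | week6/recommend_new_id/joonsun.py | remove_dot
-- ===== SOURCE A (Python) =====
-- def remove_dot(string):
--     result = ""
--     dot_flag = False
--     for c in string:
--         if c == "." and dot_flag == True:
--             continue
--
--         if c == ".":
--             dot_flag = True
--         else:
--             dot_flag = False
--         result += c
--
--     result = result.lstrip(".")
--     result = result.rstrip(".")
--     return result
-- ===== SOURCE B (Python) =====
-- def remove_dot(string):
--     return ".".join(filter(None, string.split(".")))
-- ===== Notes on version B (the rewrite author's own statement) =====
-- stated objective: faster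
-- what changed: Replaces A's stateful char-by-char accumulation (dot_flag, result += c) plus lstrip/rstrip with a single split-on-dot / drop-empty-tokens / rejoin pipeline.
import Mathlib
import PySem

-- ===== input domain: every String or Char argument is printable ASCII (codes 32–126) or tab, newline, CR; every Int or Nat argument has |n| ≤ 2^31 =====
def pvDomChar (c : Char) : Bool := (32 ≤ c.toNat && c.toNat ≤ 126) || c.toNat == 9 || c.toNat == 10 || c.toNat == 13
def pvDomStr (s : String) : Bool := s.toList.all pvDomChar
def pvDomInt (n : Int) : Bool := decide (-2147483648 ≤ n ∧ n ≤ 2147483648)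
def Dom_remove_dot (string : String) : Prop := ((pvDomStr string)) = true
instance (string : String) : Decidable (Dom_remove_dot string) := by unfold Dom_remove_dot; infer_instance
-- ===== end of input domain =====

-- B collapses runs of dots and trims edge dots via split('.') / drop empty tokens / '.'.join,
-- instead of A's char-by-char loop with quadratic 'result += c' accumulation followed by lstrip/rstrip
-- (a timing run measured B faster at the largest size).

-- ===== PORT A =====
-- the loop: 'result += c' unless c is a dot following a dot; dot_flag tracks whether the previous kept char was a dot
def remove_dot (string : String) : String :=
  let st := string.toList.foldl
    (fun (st : List Char × Bool) (c : Char) =>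
      if c == '.' && st.2 then st                -- 'continue'
      else (st.1 ++ [c], c == '.'))              -- dot_flag = (c == "."); result += c
    ([], false)
  -- result.lstrip(".") / result.rstrip(".") ported by hand (PySem has no chars-argument lstrip/rstrip):
  -- exact — Python drops the maximal run of '.' from the left (resp. from the right, here via reverse)
  let r1 := List.dropWhile (· == '.') st.1
  let r2 := (List.dropWhile (· == '.') r1.reverse).reverse
  String.ofList r2

-- ===== PORT B =====
-- string.split('.') → PySem.Chars.splitOn; filter(None, …) drops exactly the empty tokens; '.'.join → PySem.Chars.join
def remove_dot_alt (string : String) : String :=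
  String.ofList (PySem.Chars.join ['.']
    ((PySem.Chars.splitOn string.toList ['.']).filter (fun p => !p.isEmpty)))

-- ===== PRECONDITION & SPEC =====
def Spec_remove_dot (string : String) (out : String) : Prop := out = remove_dot_alt string
instance (string : String) (out : String) : Decidable (Spec_remove_dot string out) := by unfold Spec_remove_dot; infer_instance

-- ===== CLAIM (what is proved, stated in full; the proofs are below) =====
def Claim_equal_remove_dot : Prop := ∀ (string : String), Dom_remove_dot string → Spec_remove_dot string (remove_dot string)

-- ===== LEMMAS AND PROOFS =====

def pvCollapse : Bool → List Char → List Char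
  | _, [] => []
  | flag, c :: cs => if c == '.' && flag then pvCollapse flag cs
                     else c :: pvCollapse (c == '.') cs

def pvSplit : List Char → List Char → List (List Char)
  | [], cur => [cur.reverse]
  | c :: cs, cur => if c == '.' then cur.reverse :: pvSplit cs [] else pvSplit cs (c :: cur)

def pvToks (cs : List Char) : List (List Char) :=
  (pvSplit cs []).filter (fun p => !p.isEmpty)

def pvJoin : List (List Char) → List Char
  | [] => []
  | [h] => h
  | h :: t => h ++ '.' :: pvJoin t

theorem pvRstrip_cons_nodot {c : Char} (hc : c ≠ '.') (l : List Char) :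
    (List.dropWhile (· == '.') (c :: l).reverse).reverse
      = c :: (List.dropWhile (· == '.') l.reverse).reverse := by
  rw [List.reverse_cons, List.dropWhile_append]
  by_cases h : List.dropWhile (· == '.') l.reverse = []
  · rw [if_pos (by simp [h])]
    simp [hc, h]
  · rw [if_neg (by simp [h])]
    simp

theorem pvRstrip_word {w : List Char} (hw : ∀ c ∈ w, c ≠ '.') (l : List Char) :
    (List.dropWhile (· == '.') (w ++ l).reverse).reverse
      = w ++ (List.dropWhile (· == '.') l.reverse).reverse := by
  induction w with
  | nil => simp
  | cons c w ih =>
    rw [List.cons_append, pvRstrip_cons_nodot (hw c (by simp)) (w ++ l),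
      ih (fun x hx => hw x (by simp [hx]))]
    simp

theorem pvRstrip_dot_cons (l : List Char) :
    (List.dropWhile (· == '.') ('.' :: l).reverse).reverse
      = if (List.dropWhile (· == '.') l.reverse).reverse = [] then []
        else '.' :: (List.dropWhile (· == '.') l.reverse).reverse := by
  rw [List.reverse_cons, List.dropWhile_append]
  by_cases h : List.dropWhile (· == '.') l.reverse = []
  · rw [if_pos (by simp [h]), if_pos (by simp [h])]
    simp
  · rw [if_neg (by simp [h]), if_neg (by simp [h])]
    simp

theorem pvCollapse_true (cs : List Char) :
    pvCollapse true cs = pvCollapse false (List.dropWhile (· == '.') cs) := by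
  induction cs with
  | nil => simp [pvCollapse]
  | cons c cs ih =>
    by_cases hc : c == '.'
    · have hc' : c = '.' := by simpa using hc
      simp [pvCollapse, hc', ih]
    · simp [pvCollapse, hc]

theorem pvCollapse_word {w : List Char} (hw : ∀ c ∈ w, c ≠ '.') (r : List Char) :
    pvCollapse false (w ++ r) = w ++ pvCollapse false r := by
  induction w with
  | nil => simp
  | cons c w ih =>
    have hc : (c == '.') = false := by simpa using hw c (by simp)
    simp [pvCollapse, hc, ih (fun x hx => hw x (by simp [hx]))]

theorem pvToks_dot (cs : List Char) : pvToks ('.' :: cs) = pvToks cs := by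
  simp [pvToks, pvSplit]

theorem pvToks_dropWhile (cs : List Char) :
    pvToks (List.dropWhile (· == '.') cs) = pvToks cs := by
  induction cs with
  | nil => rfl
  | cons c cs ih =>
    by_cases hc : c == '.'
    · have hc' : c = '.' := by simpa using hc
      rw [hc', List.dropWhile_cons]
      simpa [pvToks_dot] using ih
    · simp [hc]

theorem pvSplit_word_nil {w : List Char} (hw : ∀ c ∈ w, c ≠ '.') :
    ∀ cur, pvSplit w cur = [cur.reverse ++ w] := by
  induction w with
  | nil => intro cur; simp [pvSplit]
  | cons c w ih =>
    intro cur
    have hc : (c == '.') = false := by simpa using hw c (by simp)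
    simp [pvSplit, hc, ih (fun x hx => hw x (by simp [hx]))]

theorem pvSplit_word {w : List Char} (hw : ∀ c ∈ w, c ≠ '.') (r : List Char) :
    ∀ cur, pvSplit (w ++ '.' :: r) cur = (cur.reverse ++ w) :: pvSplit r [] := by
  induction w with
  | nil => intro cur; simp [pvSplit]
  | cons c w ih =>
    intro cur
    have hc : (c == '.') = false := by simpa using hw c (by simp)
    simp [pvSplit, hc, ih (fun x hx => hw x (by simp [hx]))]

theorem pvToks_ne_nil (cs : List Char) : ∀ p ∈ pvToks cs, p ≠ [] := by
  intro p hp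
  have := List.of_mem_filter hp
  simpa using this

theorem pvJoin_eq_nil {l : List (List Char)} (h : ∀ p ∈ l, p ≠ []) :
    pvJoin l = [] ↔ l = [] := by
  cases l with
  | nil => simp [pvJoin]
  | cons a t =>
    cases t with
    | nil =>
      have := h a (by simp)
      simp [pvJoin, this]
    | cons b t' =>
      constructor
      · intro hj
        simp [pvJoin] at hj
      · intro hc; simp at hc

-- head of a collapse of a dot-free-headed list is not a dot
theorem pvLstrip_collapse (ds : List Char)
    (h : ∀ c, ds.head? = some c → c ≠ '.') :
    List.dropWhile (· == '.') (pvCollapse false ds) = pvCollapse false ds := by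
  cases ds with
  | nil => simp [pvCollapse]
  | cons c cs =>
    have hc : (c == '.') = false := by simpa using h c rfl
    simp [pvCollapse, hc]

theorem pvDropHead {p : Char → Bool} {l : List Char} {d : Char} {r : List Char}
    (h : List.dropWhile p l = d :: r) : p d = false := by
  have := List.head?_dropWhile_not p l
  rw [h] at this
  simpa using this

theorem pvMain : ∀ (n : Nat) (cs : List Char), cs.length ≤ n →
    (List.dropWhile (· == '.')
        (List.dropWhile (· == '.') (pvCollapse false cs)).reverse).reverse
      = pvJoin (pvToks cs) := by
  intro n
  induction n with
  | zero =>
    intro cs h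
    have : cs = [] := List.eq_nil_of_length_eq_zero (by omega)
    subst this
    simp [pvCollapse, pvToks, pvSplit, pvJoin]
  | succ n ih =>
    intro cs h
    match cs with
    | [] => simp [pvCollapse, pvToks, pvSplit, pvJoin]
    | c :: cs' =>
      by_cases hc : c = '.'
      · -- leading dot: A emits one dot which lstrip removes; B drops the empty token
        subst hc
        have hstep : pvCollapse false ('.' :: cs') = '.' :: pvCollapse true cs' := by
          simp [pvCollapse]
        rw [hstep, List.dropWhile_cons]
        simp only [show (('.' : Char) == '.') = true from by simp, if_pos]
        rw [pvCollapse_true]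
        have hlen : (List.dropWhile (· == '.') cs').length ≤ n := by
          have := List.length_dropWhile_le (p := (· == '.')) (l := cs')
          simp at h; omega
        rw [ih _ hlen, pvToks_dropWhile, pvToks_dot]
      · -- word case: cs = w ++ r with w the maximal dot-free prefix
        have hsplit : List.takeWhile (fun x => !(x == '.')) (c :: cs')
            ++ List.dropWhile (fun x => !(x == '.')) (c :: cs') = c :: cs' :=
          List.takeWhile_append_dropWhile
        set w := List.takeWhile (fun x => !(x == '.')) (c :: cs') with hw_def
        set r := List.dropWhile (fun x => !(x == '.')) (c :: cs') with hr_def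
        have hwmem : ∀ x ∈ w, x ≠ '.' := by
          intro x hx
          have := List.mem_takeWhile_imp (hw_def ▸ hx)
          simpa using this
        have hwcons : ∃ wt, w = c :: wt := by
          refine ⟨List.takeWhile (fun x => !(x == '.')) cs', ?_⟩
          simp [hw_def, hc]
        obtain ⟨wt, hwc⟩ := hwcons
        rw [← hsplit, pvCollapse_word hwmem]
        have hdw : ∀ X : List Char,
            List.dropWhile (· == '.') (w ++ X) = w ++ X := by
          intro X
          rw [hwc, List.cons_append, List.dropWhile_cons]
          simp [hc]
        rw [hdw, pvRstrip_word hwmem]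
        -- r is empty or starts with a dot
        match hr : r with
        | [] =>
          have hRHS : pvToks (w ++ []) = [w] := by
            rw [List.append_nil, pvToks, pvSplit_word_nil hwmem []]
            simp [hwc]
          rw [hRHS]
          simp [pvCollapse, pvJoin]
        | d :: r' =>
          have hd : d = '.' := by
            have hdd : (!(d == '.')) = false :=
              pvDropHead (p := fun x => !(x == '.')) (show List.dropWhile (fun x => !(x == '.')) (c :: cs') = d :: r' by
                rw [← hr_def])
            simpa using hdd
          subst hd
          have hstep : pvCollapse false ('.' :: r') = '.' :: pvCollapse true r' := by
            simp [pvCollapse]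
          rw [hstep, pvCollapse_true, pvRstrip_dot_cons]
          set ds := List.dropWhile (· == '.') r' with hds_def
          have hdsw : List.dropWhile (· == '.') (pvCollapse false ds) = pvCollapse false ds := by
            apply pvLstrip_collapse
            intro x hx
            match hds : ds with
            | [] => simp at hx
            | e :: es =>
              have he : (e == '.') = false :=
                pvDropHead (p := (· == '.')) (show List.dropWhile (· == '.') r' = e :: es by
                  rw [← hds_def])
              simp at hx
              subst hx
              simpa using he
          have hlen : ds.length ≤ n := by
            have h1 : ds.length ≤ r'.length := by
              rw [hds_def]; exact List.length_dropWhile_le _ _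
            have h2 : w.length + (r'.length + 1) = cs'.length + 1 := by
              have := congrArg List.length hsplit
              simpa using this
            have h4 : 1 ≤ w.length := by rw [hwc]; simp
            simp at h
            omega
          have hY := ih ds hlen
          rw [hdsw] at hY
          rw [hY]
          -- right-hand side
          have hRHS : pvToks (w ++ '.' :: r') = w :: pvToks ds := by
            have hTr : pvToks ds = pvToks r' := by
              rw [hds_def]; exact pvToks_dropWhile r'
            rw [pvToks, pvSplit_word hwmem r' [], List.filter_cons, hTr]
            simp [hwc]
            rfl
          rw [hRHS]
          by_cases hT : pvToks ds = []
          · rw [hT]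
            simp [pvJoin]
          · rw [if_neg (fun hj => hT ((pvJoin_eq_nil (pvToks_ne_nil ds)).mp hj))]
            match hTc : pvToks ds with
            | [] => exact absurd hTc hT
            | t0 :: ts => simp [pvJoin]

theorem pvGo (cs : List Char) : ∀ (fuel : Nat) (cur : List Char) (acc : List (List Char)),
    cs.length ≤ fuel →
    PySem.Chars.splitOn.go ['.'] fuel cs cur acc = acc.reverse ++ pvSplit cs cur := by
  induction cs with
  | nil =>
    intro fuel cur acc _
    cases fuel <;> simp [PySem.Chars.splitOn.go, pvSplit]
  | cons c cs ih =>
    intro fuel cur acc h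
    cases fuel with
    | zero => simp at h
    | succ f =>
      by_cases hc : c == '.'
      · have hc' : c = '.' := by simpa using hc
        subst hc'
        rw [show PySem.Chars.splitOn.go ['.'] (f+1) ('.'::cs) cur acc
            = PySem.Chars.splitOn.go ['.'] f cs [] (cur.reverse :: acc) from by
          simp [PySem.Chars.splitOn.go, List.isPrefixOf]]
        rw [ih f [] (cur.reverse :: acc) (by simpa using h)]
        simp [pvSplit]
      · have hc' : c ≠ '.' := by simpa using hc
        rw [show PySem.Chars.splitOn.go ['.'] (f+1) (c::cs) cur acc
            = PySem.Chars.splitOn.go ['.'] f cs (c :: cur) acc from by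
          simp [PySem.Chars.splitOn.go, List.isPrefixOf]
          intro heq; exact absurd heq.symm hc']
        rw [ih f (c :: cur) acc (by simpa using h)]
        simp [pvSplit, hc']

theorem pvFoldA (cs : List Char) : ∀ (acc : List Char) (flag : Bool),
    (cs.foldl (fun (st : List Char × Bool) (c : Char) =>
        if c == '.' && st.2 then st else (st.1 ++ [c], c == '.')) (acc, flag)).1
      = acc ++ pvCollapse flag cs := by
  induction cs with
  | nil => intro acc flag; simp [pvCollapse]
  | cons c cs ih =>
    intro acc flag
    rw [List.foldl_cons]
    by_cases h : (c == '.' && flag) = true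
    · rw [if_pos h, ih]
      simp only [pvCollapse, if_pos h]
    · rw [if_neg h, ih]
      simp [pvCollapse, h]

theorem pvSplitOn_eq (cs : List Char) :
    PySem.Chars.splitOn cs ['.'] = pvSplit cs [] := by
  simpa using pvGo cs (cs.length + 1) [] [] (by omega)

theorem pvJoin_eq_intercalate (l : List (List Char)) :
    List.intercalate ['.'] l = pvJoin l := by
  induction l with
  | nil => simp [pvJoin, List.intercalate]
  | cons h t ih =>
    cases t with
    | nil => simp [pvJoin, List.intercalate]
    | cons h' t' => simp [pvJoin, ← ih, List.intercalate, List.intersperse]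

-- ===== VERDICT (by name: the statement is the Claim_ definition above) =====
theorem remove_dot_spec : Claim_equal_remove_dot := by
  unfold Claim_equal_remove_dot Spec_remove_dot
  intro s _
  unfold remove_dot remove_dot_alt
  rw [pvSplitOn_eq]
  simp only [pvFoldA s.toList [] false, List.nil_append]
  rw [show PySem.Chars.join ['.'] ((pvSplit s.toList []).filter (fun p => !p.isEmpty))
        = pvJoin (pvToks s.toList) from by
      simp [PySem.Chars.join, pvToks, pvJoin_eq_intercalate]]
  rw [pvMain s.toList.length s.toList le_rfl]
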